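-- pv_equiv track=rewrite | github.com/ocseal/farkle | game.py | choice_helper
-- ===== SOURCE A (Python) =====
-- def choice_helper(scores):
--     choices = []
--     sorted_scores = [[score for score in scores if score[0] == 1], [score for score in scores if score[0] == 2],
--                      [score for score in scores if score[0] == 3], [score for score in scores if score[0] == 4],
--                      [score for score in scores if score[0] == 5], [score for score in scores if score[0] == 6]]
--     for score in sorted_scores:
--         if score:
--             choices.append(max(score))
--     return choices
-- ===== SOURCE B (Python) =====
-- def choice_helper(scores):
--     best = {}
--     for s in scores:
--         cur = best.get(s[0])
--         if cur is None or s > cur: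
--             best[s[0]] = s
--     return [best[v] for v in range(1, 7) if v in best]
-- ===== Notes on version B (the rewrite author's own statement) =====
-- stated objective: simpler
-- what changed: Replaces the six separate filtering passes plus per-group max with one pass over scores that maintains a dict of the running lexicographic max per die value, then reads values 1..6 from the dict in order.
import Mathlib
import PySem

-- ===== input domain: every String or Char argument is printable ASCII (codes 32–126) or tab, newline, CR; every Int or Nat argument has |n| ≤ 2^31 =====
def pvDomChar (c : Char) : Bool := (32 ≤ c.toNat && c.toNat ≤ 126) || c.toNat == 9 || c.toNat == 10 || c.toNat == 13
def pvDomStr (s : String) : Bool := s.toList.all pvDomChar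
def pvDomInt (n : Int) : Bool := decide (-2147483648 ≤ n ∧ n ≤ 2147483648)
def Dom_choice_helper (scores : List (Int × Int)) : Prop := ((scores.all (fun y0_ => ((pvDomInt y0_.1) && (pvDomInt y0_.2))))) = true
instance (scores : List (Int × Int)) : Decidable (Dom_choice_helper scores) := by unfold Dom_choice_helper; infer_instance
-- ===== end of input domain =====

-- B replaces A's six filtering passes + per-group max with one pass building a dict of running maxima per die value (objective: simpler).


-- ===== PORT A =====
def choice_helper (scores : List (Int × Int)) : List (Int × Int) :=
  let sorted_scores : List (List (Int × Int)) :=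
    [scores.filter (fun score => score.1 == 1), scores.filter (fun score => score.1 == 2),
     scores.filter (fun score => score.1 == 3), scores.filter (fun score => score.1 == 4),
     scores.filter (fun score => score.1 == 5), scores.filter (fun score => score.1 == 6)]
  sorted_scores.foldl (fun choices score =>
    if score.isEmpty then choices
    else
      -- max(score): Python tuple max = lexicographic max on the pair, first extremal
      match PySem.List.max2? score Prod.fst Prod.snd with
      | some m => choices ++ [m]
      | none => choices) []

-- ===== PORT B =====
-- s > cur on Python pairs of ints: lexicographic
def pyGtPair (s cur : Int × Int) : Bool := decide (cur.1 < s.1 ∨ (cur.1 = s.1 ∧ cur.2 < s.2))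

def choice_helper_alt (scores : List (Int × Int)) : List (Int × Int) :=
  let best := scores.foldl (fun d s =>
    match d.get? s.1 with
    | none => d.insert s.1 s
    | some cur => if pyGtPair s cur then d.insert s.1 s else d) PySem.Dict.empty
  (PySem.List.pyRange 1 7 1).filterMap (fun v => best.get? v)

-- ===== PRECONDITION & SPEC =====
def Spec_choice_helper (scores : List (Int × Int)) (out : List (Int × Int)) : Prop := out = choice_helper_alt scores
instance (scores : List (Int × Int)) (out : List (Int × Int)) : Decidable (Spec_choice_helper scores out) := by unfold Spec_choice_helper; infer_instance

-- ===== CLAIM (what is proved, stated in full; the proofs are below) =====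
def Claim_equal_choice_helper : Prop := ∀ (scores : List (Int × Int)), Dom_choice_helper scores → Spec_choice_helper scores (choice_helper scores)

-- ===== LEMMAS AND PROOFS =====

-- the running-max accumulator step that both programs' per-key maxima boil down to
def updB (o : Option (Int × Int)) (s : Int × Int) : Option (Int × Int) :=
  match o with
  | none => some s
  | some cur => if pyGtPair s cur then some s else some cur

-- B's dict step
def stepB (d : PySem.Dict Int (Int × Int)) (s : Int × Int) : PySem.Dict Int (Int × Int) :=
  match d.get? s.1 with
  | none => d.insert s.1 s
  | some cur => if pyGtPair s cur then d.insert s.1 s else d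

lemma get?_stepB_fold (scores : List (Int × Int)) (d : PySem.Dict Int (Int × Int)) (v : Int) :
    (scores.foldl stepB d).get? v =
    (scores.filter (fun s => s.1 == v)).foldl updB (d.get? v) := by
  induction scores generalizing d with
  | nil => rfl
  | cons s t ih =>
    simp only [List.foldl, List.filter]
    by_cases hv : s.1 = v
    · subst hv
      simp only [beq_self_eq_true, List.foldl]
      rw [ih]
      congr 1
      unfold stepB updB
      cases h : d.get? s.1 with
      | none => simp [PySem.Dict.get?_insert_self]
      | some cur =>
        by_cases hg : pyGtPair s cur = true
        · simp only [hg, if_true, PySem.Dict.get?_insert_self]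
        · simp [h, hg]
    · have hb : (s.1 == v) = false := by simp [hv]
      simp only [hb]
      rw [ih]
      congr 1
      unfold stepB
      have hne : v ≠ s.1 := fun hh => hv hh.symm
      cases h : d.get? s.1 with
      | none => rw [PySem.Dict.get?_insert_of_ne _ _ hne]
      | some cur =>
        by_cases hg : pyGtPair s cur = true
        · simp only [hg, if_true]
          rw [PySem.Dict.get?_insert_of_ne _ _ hne]
        · simp [hg]

-- max2? with (fst, snd) keys IS the updB running-max fold
lemma max2?_eq_foldl_updB (g : List (Int × Int)) :
    PySem.List.max2? g Prod.fst Prod.snd = g.foldl updB none := by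
  unfold PySem.List.max2?
  congr 1
  funext o x
  cases o with
  | none => rfl
  | some m =>
    simp only [updB, pyGtPair]
    congr 1
    rcases m with ⟨m1, m2⟩; rcases x with ⟨x1, x2⟩
    simp only [eq_iff_iff, Bool.or_eq_true, Bool.and_eq_true, Bool.not_eq_true',
      decide_eq_true_eq, decide_eq_false_iff_not]
    omega

-- foldl updB from some is always some
lemma foldl_updB_some (t : List (Int × Int)) (a : Int × Int) :
    ∃ m, t.foldl updB (some a) = some m := by
  induction t generalizing a with
  | nil => exact ⟨a, rfl⟩
  | cons x t ih =>
    simp only [List.foldl, updB]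
    split <;> exact ih _

-- A's loop body equals "append the option's content"
lemma stepA_eq (choices : List (Int × Int)) (g : List (Int × Int)) :
    (if g.isEmpty then choices
     else
       match PySem.List.max2? g Prod.fst Prod.snd with
       | some m => choices ++ [m]
       | none => choices) = choices ++ (g.foldl updB none).toList := by
  cases g with
  | nil => simp
  | cons a t =>
    simp only [List.isEmpty_cons, Bool.false_eq_true, if_false]
    rw [max2?_eq_foldl_updB]
    obtain ⟨m, hm⟩ := foldl_updB_some t a
    simp only [List.foldl, show updB none a = some a from rfl, hm, Option.toList]

-- ===== VERDICT (by name: the statement is the Claim_ definition above) =====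
theorem choice_helper_spec : Claim_equal_choice_helper := by
  intro scores _
  show choice_helper scores = choice_helper_alt scores
  unfold choice_helper choice_helper_alt
  have hrange : PySem.List.pyRange 1 7 1 = [1, 2, 3, 4, 5, 6] := by decide
  simp only [hrange, List.foldl, List.filterMap]
  rw [stepA_eq, stepA_eq, stepA_eq, stepA_eq, stepA_eq, stepA_eq]
  have hd : ∀ v : Int,
      (scores.foldl stepB PySem.Dict.empty).get? v =
      (scores.filter (fun s => s.1 == v)).foldl updB none := by
    intro v
    rw [get?_stepB_fold]
    rfl
  show ([] : List (Int × Int)) ++ _ ++ _ ++ _ ++ _ ++ _ ++ _ = _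
  simp only [show (fun (d : PySem.Dict Int (Int × Int)) (s : Int × Int) =>
      match d.get? s.1 with
      | none => d.insert s.1 s
      | some cur => if pyGtPair s cur then d.insert s.1 s else d) = stepB from rfl]
  rw [hd 1, hd 2, hd 3, hd 4, hd 5, hd 6]
  cases h1 : (scores.filter (fun s => s.1 == 1)).foldl updB none <;>
  cases h2 : (scores.filter (fun s => s.1 == 2)).foldl updB none <;>
  cases h3 : (scores.filter (fun s => s.1 == 3)).foldl updB none <;>
  cases h4 : (scores.filter (fun s => s.1 == 4)).foldl updB none <;>
  cases h5 : (scores.filter (fun s => s.1 == 5)).foldl updB none <;>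
  cases h6 : (scores.filter (fun s => s.1 == 6)).foldl updB none <;> simp
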